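-- pv_equiv track=rewrite | github.com/pypi-data/pypi-mirror-63 | packages/Decision-tree-zrq-demo/Decision_tree_zrq_demo-0.0.2.tar.gz/Decision_tree_zrq_demo-0.0.2/neupy_core_model_api_src/chiMerge.py | build
-- ===== SOURCE A (Python) =====
-- def build(log_cnt):
--     '''''Build a structure (a list of truples) that ChiMerge algorithm works properly on it
--          return a list like ([0:[6,0]],...) 含义：变量值为0是，非违规6人，违规0人 '''
--     log_dic={}
--     for record in log_cnt:
--         if record[0] not in log_dic.keys():
--             log_dic[record[0]]=[0,0]
--         if record[1]==0:
--             log_dic[record[0]][0]=record[2]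
--         elif record[1]==1:
--             log_dic[record[0]][1]=record[2]
--         else:
--             raise TypeError("Data Exception")
--     log_truple=sorted(log_dic.items())
--     return(log_truple)
-- ===== SOURCE B (Python) =====
-- def build(log_cnt):
--     '''Sort the records by value, then group consecutive equal values in one
--        linear pass into (value, [non_viol, viol]) entries.'''
--     for record in log_cnt:
--         if record[1] != 0 and record[1] != 1:
--             raise TypeError("Data Exception")
--     groups = []
--     for value, typ, cnt in sorted(log_cnt, key=lambda r: r[0]):
--         if not groups or groups[-1][0] != value:
--             groups.append((value, [0, 0]))
--         groups[-1][1][typ] = cnt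
--     return groups
-- ===== Notes on version B (the rewrite author's own statement) =====
-- stated objective: alternative
-- what changed: Replaces A's dict accumulation (create-on-miss, in-place slot assignment, then sorted(items)) by a stable sort of the records followed by a single linear grouping pass with in-place slot assignment; Pre_ excludes exactly the inputs with a record type other than 0/1, on which A raises TypeError.
import Mathlib
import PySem

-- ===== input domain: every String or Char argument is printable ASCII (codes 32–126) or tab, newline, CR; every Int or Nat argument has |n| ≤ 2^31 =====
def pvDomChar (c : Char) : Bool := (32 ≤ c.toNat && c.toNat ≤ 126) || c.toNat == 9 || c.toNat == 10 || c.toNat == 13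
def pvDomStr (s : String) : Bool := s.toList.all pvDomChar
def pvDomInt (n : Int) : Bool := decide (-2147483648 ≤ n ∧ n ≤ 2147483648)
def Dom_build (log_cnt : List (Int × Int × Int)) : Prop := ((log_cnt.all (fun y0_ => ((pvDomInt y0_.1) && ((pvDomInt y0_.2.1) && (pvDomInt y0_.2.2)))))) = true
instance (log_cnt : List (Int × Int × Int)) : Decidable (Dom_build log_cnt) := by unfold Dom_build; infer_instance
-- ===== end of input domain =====

-- B replaces A's dict accumulation + sorted(items) by a stable sort of the records
-- followed by one linear grouping pass (alternative decomposition, no speed claim).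

-- ===== PORT A =====
-- one iteration of A's loop body
def buildStep (d : PySem.Dict Int (List Int)) (r : Int × Int × Int) : PySem.Dict Int (List Int) :=
  let d' := if d.contains r.1 then d else d.insert r.1 [0, 0]
  if r.2.1 == 0 then d'.modify r.1 [0, 0] (fun v => v.set 0 r.2.2)
  else if r.2.1 == 1 then d'.modify r.1 [0, 0] (fun v => v.set 1 r.2.2)
  else d'   -- Python raises TypeError here; Pre_build excludes exactly these inputs

def build (log_cnt : List (Int × Int × Int)) : List (Int × List Int) :=
  -- sorted(log_dic.items()): dict keys are distinct, so Python's tuple comparison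
  -- of the items reduces exactly to a stable sort by the key component
  PySem.List.sorted ((log_cnt.foldl buildStep PySem.Dict.empty).items) (fun p => p.1) false

-- ===== PORT B =====
-- Source B's `groups[-1][1][typ] = cnt`: assign into the last group's pair.
-- `typ.toNat` is exact for typ ∈ {0, 1}, which Source B's validation loop guarantees
-- (on any other input Source B raised TypeError; Pre_build excludes exactly those inputs)
def assignLast (t c : Int) : List (Int × List Int) → List (Int × List Int)
  | [] => []
  | [p] => [(p.1, p.2.set t.toNat c)]
  | p :: q :: rest => p :: assignLast t c (q :: rest)

-- one iteration of Source B's grouping loop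
def groupStep (groups : List (Int × List Int)) (r : Int × Int × Int) : List (Int × List Int) :=
  let g := match groups.getLast? with
    | none => groups ++ [(r.1, [0, 0])]
    | some p => if p.1 = r.1 then groups else groups ++ [(r.1, [0, 0])]
  assignLast r.2.1 r.2.2 g

def build_alt (log_cnt : List (Int × Int × Int)) : List (Int × List Int) :=
  (PySem.List.sorted log_cnt (fun r => r.1) false).foldl groupStep []

-- ===== PRECONDITION & SPEC =====
-- Pre_build excludes exactly the inputs on which both Pythons raise TypeError (a record type other than 0/1)
def Pre_build (log_cnt : List (Int × Int × Int)) : Prop :=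
  ∀ r ∈ log_cnt, r.2.1 = 0 ∨ r.2.1 = 1
instance (log_cnt : List (Int × Int × Int)) : Decidable (Pre_build log_cnt) := by
  unfold Pre_build; infer_instance

def pvWitness_build : (List (Int × Int × Int)) := ([(1, 0, 3), (1, 1, 2), (0, 0, 5), (1, 0, 4)])

def Spec_build (log_cnt : List (Int × Int × Int)) (out : List (Int × List Int)) : Prop := out = build_alt log_cnt
instance (log_cnt : List (Int × Int × Int)) (out : List (Int × List Int)) : Decidable (Spec_build log_cnt out) := by unfold Spec_build; infer_instance

-- ===== CLAIM (what is proved, stated in full; the proofs are below) =====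
def Claim_equal_build : Prop := ∀ (log_cnt : List (Int × Int × Int)), Dom_build log_cnt → Pre_build log_cnt → Spec_build log_cnt (build log_cnt)

-- ===== LEMMAS AND PROOFS =====

-- canonical form both ports are reduced to: the strictly increasing list of distinct
-- keys, each paired with the LAST count written for that key and slot in input order
def keysOf (l : List (Int × Int × Int)) : List Int := l.map (fun r => r.1)

def lastCnt (l : List (Int × Int × Int)) (k t : Int) : Int :=
  match l.reverse.find? (fun r => r.1 == k && r.2.1 == t) with
  | some r => r.2.2
  | none => 0

def canonK (l : List (Int × Int × Int)) : List Int :=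
  PySem.List.sorted (PySem.Set.ofList (keysOf l)) (fun x => x) false

def canonC (l : List (Int × Int × Int)) : List (Int × List Int) :=
  (canonK l).map (fun k => (k, [lastCnt l k 0, lastCnt l k 1]))

-- ---- A-side: build l = canonC l ----

-- the effect of one A-loop iteration on the value stored at key k (seen through getD with the init value)
def slotStep (k : Int) (v : List Int) (r : Int × Int × Int) : List Int :=
  if r.1 == k then
    (if r.2.1 == 0 then v.set 0 r.2.2 else if r.2.1 == 1 then v.set 1 r.2.2 else v)
  else v

-- lastCnt with an explicit fallback (the loop invariant's accumulator)
def lastD (l : List (Int × Int × Int)) (k t dflt : Int) : Int :=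
  match l.reverse.find? (fun r => r.1 == k && r.2.1 == t) with
  | some r => r.2.2
  | none => dflt

theorem getD_absent (d : PySem.Dict Int (List Int)) (k : Int) (h : d.contains k = false) :
    d.getD k [0, 0] = [0, 0] := by
  simp [PySem.Dict.getD, (PySem.Dict.get?_eq_none_iff_contains d k).mpr h]

theorem getD_buildStep (d : PySem.Dict Int (List Int)) (r : Int × Int × Int) (k : Int) :
    (buildStep d r).getD k [0, 0] = slotStep k (d.getD k [0, 0]) r := by
  have hgd : ∀ k' : Int,
      (if d.contains r.1 then d else d.insert r.1 [0, 0]).getD k' [0, 0] = d.getD k' [0, 0] := by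
    intro k'
    split_ifs with hc
    · rfl
    · by_cases hk : k' = r.1
      · subst hk
        rw [PySem.Dict.getD_insert_self, getD_absent d r.1 (by simpa using hc)]
      · exact PySem.Dict.getD_insert_of_ne d _ _ hk
  simp only [buildStep]
  by_cases h0 : r.2.1 = 0
  · rw [if_pos (show (r.2.1 == 0) = true by simpa using h0),
      PySem.Dict.getD_modify, hgd k, hgd r.1]
    by_cases hk : r.1 = k
    · subst hk; simp [slotStep, h0]
    · rw [if_neg (fun h => hk h.symm)]; simp [slotStep, hk]
  · by_cases h1 : r.2.1 = 1
    · rw [if_neg (show ¬(r.2.1 == 0) = true by simpa using h0),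
        if_pos (show (r.2.1 == 1) = true by simpa using h1),
        PySem.Dict.getD_modify, hgd k, hgd r.1]
      by_cases hk : r.1 = k
      · subst hk; simp [slotStep, h1]
      · rw [if_neg (fun h => hk h.symm)]; simp [slotStep, hk]
    · rw [if_neg (show ¬(r.2.1 == 0) = true by simpa using h0),
        if_neg (show ¬(r.2.1 == 1) = true by simpa using h1), hgd k]
      simp [slotStep, h0, h1]

theorem getD_foldl (l : List (Int × Int × Int)) (d : PySem.Dict Int (List Int)) (k : Int) :
    (l.foldl buildStep d).getD k [0, 0] = l.foldl (slotStep k) (d.getD k [0, 0]) := by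
  induction l generalizing d with
  | nil => rfl
  | cons r l ih => simp only [List.foldl_cons, ih, getD_buildStep]

theorem keys_buildStep (d : PySem.Dict Int (List Int)) (r : Int × Int × Int) :
    (buildStep d r).keys = PySem.Set.add d.keys r.1 := by
  have hkd : ∀ e : PySem.Dict Int (List Int), e.contains r.1 = true →
      ∀ f : List Int → List Int, (e.modify r.1 [0, 0] f).keys = e.keys := by
    intro e he f
    rw [PySem.Dict.keys_modify, PySem.Dict.keys_insert_of_contains e _ he]
  simp only [buildStep, PySem.Set.add, PySem.Set.contains]
  by_cases hc : d.contains r.1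
  · have hsk : (List.contains d.keys r.1) = true := by
      simpa using (PySem.Dict.contains_iff_mem_keys d r.1).mp hc
    rw [if_pos hc]
    by_cases h0 : (r.2.1 == 0) = true
    · rw [if_pos h0, hkd d hc, if_pos hsk]
    · by_cases h1 : (r.2.1 == 1) = true
      · rw [if_neg h0, if_pos h1, hkd d hc, if_pos hsk]
      · rw [if_neg h0, if_neg h1, if_pos hsk]
  · have hmem : r.1 ∉ d.keys := fun h => hc ((PySem.Dict.contains_iff_mem_keys d r.1).mpr h)
    have hsk : ¬ (List.contains d.keys r.1) = true := by simp [hmem]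
    have hins : (d.insert r.1 ([0, 0] : List Int)).keys = d.keys ++ [r.1] :=
      PySem.Dict.keys_insert_of_not_contains d _ (by simpa using hc)
    have hic : (d.insert r.1 ([0, 0] : List Int)).contains r.1 = true := by
      simp
    rw [if_neg hc]
    by_cases h0 : (r.2.1 == 0) = true
    · rw [if_pos h0, hkd _ hic, hins, if_neg hsk]
    · by_cases h1 : (r.2.1 == 1) = true
      · rw [if_neg h0, if_pos h1, hkd _ hic, hins, if_neg hsk]
      · rw [if_neg h0, if_neg h1, hins, if_neg hsk]

theorem keys_foldl (l : List (Int × Int × Int)) (d : PySem.Dict Int (List Int)) :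
    (l.foldl buildStep d).keys = PySem.Set.update d.keys (l.map (fun r => r.1)) := by
  induction l generalizing d with
  | nil => rfl
  | cons r l ih =>
      simp only [List.foldl_cons, List.map_cons, ih, keys_buildStep]
      rfl

theorem lastD_cons (r : Int × Int × Int) (l : List (Int × Int × Int)) (k t d : Int) :
    lastD (r :: l) k t d =
      lastD l k t (if r.1 == k && r.2.1 == t then r.2.2 else d) := by
  unfold lastD
  rw [List.reverse_cons, List.find?_append]
  cases hf : l.reverse.find? (fun r => r.1 == k && r.2.1 == t) with
  | some v => simp [Option.or]
  | none =>
      simp only [Option.or, List.find?]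
      by_cases hp : (r.1 == k && r.2.1 == t) = true <;> simp [hp]

theorem foldl_slot (l : List (Int × Int × Int)) (k a b : Int) :
    l.foldl (slotStep k) [a, b] = [lastD l k 0 a, lastD l k 1 b] := by
  induction l generalizing a b with
  | nil => rfl
  | cons r l ih =>
      rw [List.foldl_cons, lastD_cons, lastD_cons]
      have hs : slotStep k [a, b] r =
          [if r.1 == k && r.2.1 == 0 then r.2.2 else a,
           if r.1 == k && r.2.1 == 1 then r.2.2 else b] := by
        unfold slotStep
        by_cases hk : r.1 = k <;> by_cases h0 : r.2.1 = 0 <;> by_cases h1 : r.2.1 = 1 <;>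
          simp [hk, h0, h1, List.set]
      rw [hs, ih]

theorem getD_final (l : List (Int × Int × Int)) (k : Int) :
    (l.foldl buildStep PySem.Dict.empty).getD k [0, 0] = [lastCnt l k 0, lastCnt l k 1] := by
  rw [getD_foldl, PySem.Dict.getD_empty, foldl_slot]
  rfl

theorem keys_final (l : List (Int × Int × Int)) :
    (l.foldl buildStep PySem.Dict.empty).keys = PySem.Set.ofList (keysOf l) := by
  rw [keys_foldl]; rfl

theorem build_eq_canon (l : List (Int × Int × Int)) : build l = canonC l := by
  unfold build canonC canonK
  set F : Int → Int × List Int := fun k => (k, [lastCnt l k 0, lastCnt l k 1]) with hF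
  have hnd : (l.foldl buildStep PySem.Dict.empty).keys.Nodup := by
    rw [keys_final]; exact PySem.Set.nodup_ofList _
  have hitems : (l.foldl buildStep PySem.Dict.empty).items
      = (PySem.Set.ofList (keysOf l)).map F := by
    rw [PySem.Dict.items_eq_map_keys _ hnd [0, 0], keys_final]
    exact List.map_congr_left (fun k _ => by rw [hF]; simp [getD_final])
  rw [hitems]
  have hperm : ((PySem.List.sorted (PySem.Set.ofList (keysOf l)) (fun x => x) false).map F).Perm
      ((PySem.Set.ofList (keysOf l)).map F) :=
    (PySem.List.sorted_perm _ _ _).map F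
  have hpw : ((PySem.List.sorted (PySem.Set.ofList (keysOf l)) (fun x => x) false).map F).Pairwise
      (fun a b => a.1 < b.1) := by
    have := PySem.List.sorted_ofList_pairwise_lt (keysOf l)
    exact List.Pairwise.map F (fun a b h => by simpa [hF] using h) this
  exact PySem.List.sorted_eq_of_perm_of_pairwise_lt _ _ _ hperm hpw

-- ---- B-side: stability of the sort ----

theorem find?_eq_head?_filter' {α : Type} (p : α → Bool) (l : List α) :
    l.find? p = (l.filter p).head? := by
  induction l with
  | nil => rfl
  | cons x l ih =>
      cases hp : p x with
      | true => rw [List.find?_cons_of_pos hp, List.filter_cons_of_pos hp]; rfl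
      | false =>
          rw [List.find?_cons_of_neg (by simp [hp]), List.filter_cons_of_neg (by simp [hp]), ih]

theorem lastCnt_eq_getLast? (l : List (Int × Int × Int)) (k t : Int) :
    lastCnt l k t =
      match (l.filter (fun r => r.1 == k && r.2.1 == t)).getLast? with
      | some r => r.2.2
      | none => 0 := by
  unfold lastCnt
  rw [find?_eq_head?_filter', List.filter_reverse, List.head?_reverse]

-- lastCnt only looks at the records with key k, in order
theorem lastCnt_congr (l l' : List (Int × Int × Int)) (k : Int)
    (h : l.filter (fun r => r.1 == k) = l'.filter (fun r => r.1 == k)) (t : Int) :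
    lastCnt l k t = lastCnt l' k t := by
  rw [lastCnt_eq_getLast?, lastCnt_eq_getLast?]
  have hf : ∀ m : List (Int × Int × Int),
      m.filter (fun r => r.1 == k && r.2.1 == t)
        = (m.filter (fun r => r.1 == k)).filter (fun r => r.2.1 == t) := by
    intro m
    rw [List.filter_filter]
    exact List.filter_congr (fun r _ => by rw [Bool.and_comm])
  rw [hf, hf, h]

theorem sorted_append_single (l : List (Int × Int × Int)) (x : Int × Int × Int) :
    PySem.List.sorted (l ++ [x]) (fun r => r.1) false
      = PySem.List.insertBy (fun a b => decide (a.1 < b.1)) x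
          (PySem.List.sorted l (fun r => r.1) false) := by
  rw [PySem.List.sorted_eq_foldl_insertBy, PySem.List.sorted_eq_foldl_insertBy,
    List.foldl_append]
  rfl

theorem filter_insertBy (x : Int × Int × Int) (k : Int) (acc : List (Int × Int × Int))
    (hpw : acc.Pairwise (fun a b => a.1 ≤ b.1)) :
    (PySem.List.insertBy (fun a b => decide (a.1 < b.1)) x acc).filter (fun r => r.1 == k)
      = acc.filter (fun r => r.1 == k) ++ (if x.1 == k then [x] else []) := by
  induction acc with
  | nil => by_cases hk : (x.1 == k) = true <;> simp [PySem.List.insertBy, List.filter, hk]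
  | cons y ys ih =>
      have hle : ∀ z ∈ ys, y.1 ≤ z.1 := (List.pairwise_cons.mp hpw).1
      have hpw' : ys.Pairwise (fun a b => a.1 ≤ b.1) := (List.pairwise_cons.mp hpw).2
      by_cases hb : (decide (x.1 < y.1)) = true
      · have hxy : x.1 < y.1 := of_decide_eq_true hb
        rw [show PySem.List.insertBy (fun a b => decide (a.1 < b.1)) x (y :: ys)
              = x :: y :: ys by simp [PySem.List.insertBy, hb]]
        by_cases hk : (x.1 == k) = true
        · have hkk : x.1 = k := by simpa using hk
          have hnil : (y :: ys).filter (fun r => r.1 == k) = [] := by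
            rw [List.filter_eq_nil_iff]
            intro z hz
            have hyz : y.1 ≤ z.1 := by
              rcases List.mem_cons.mp hz with h | h
              · exact h ▸ le_refl _
              · exact hle z h
            have : k < z.1 := lt_of_lt_of_le (hkk ▸ hxy) hyz
            simp [ne_of_gt this]
          rw [List.filter_cons, if_pos hk, hnil, if_pos hk]
          simp
        · rw [List.filter_cons, if_neg hk, if_neg hk]
          simp
      · rw [show PySem.List.insertBy (fun a b => decide (a.1 < b.1)) x (y :: ys)
              = y :: PySem.List.insertBy (fun a b => decide (a.1 < b.1)) x ys by
            simp [PySem.List.insertBy, hb]]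
        rw [List.filter_cons, List.filter_cons, ih hpw']
        split_ifs <;> simp

-- the sort is STABLE: it does not reorder the records sharing a key
theorem sorted_filter_key (l : List (Int × Int × Int)) (k : Int) :
    (PySem.List.sorted l (fun r => r.1) false).filter (fun r => r.1 == k)
      = l.filter (fun r => r.1 == k) := by
  induction l using List.reverseRecOn with
  | nil => rfl
  | append_singleton s x ih =>
      rw [sorted_append_single,
        filter_insertBy x k _ (PySem.List.sorted_pairwise s (fun r => r.1)), ih,
        List.filter_append]
      by_cases hk : (x.1 == k) = true <;> simp [List.filter, hk]

theorem lastCnt_sorted (l : List (Int × Int × Int)) (k t : Int) :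
    lastCnt (PySem.List.sorted l (fun r => r.1) false) k t = lastCnt l k t :=
  lastCnt_congr _ _ k (sorted_filter_key l k) t

theorem canonK_sorted (l : List (Int × Int × Int)) :
    canonK (PySem.List.sorted l (fun r => r.1) false) = canonK l := by
  unfold canonK
  refine PySem.List.sorted_eq_sorted_of_perm _ _ _ (fun a b h => h) ?_
  rw [List.perm_ext_iff_of_nodup (PySem.Set.nodup_ofList _) (PySem.Set.nodup_ofList _)]
  intro a
  rw [PySem.Set.mem_ofList, PySem.Set.mem_ofList]
  unfold keysOf
  simp [PySem.List.mem_sorted]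

-- ---- B-side: the grouping pass over a key-sorted list yields the canonical form ----

theorem assignLast_append_single (t c : Int) (l : List (Int × List Int)) (p : Int × List Int) :
    assignLast t c (l ++ [p]) = l ++ [(p.1, p.2.set t.toNat c)] := by
  induction l with
  | nil => rfl
  | cons q l ih =>
      cases l with
      | nil => rfl
      | cons q' l' => simpa [assignLast] using ih

theorem lastCnt_append_ne (s : List (Int × Int × Int)) (r : Int × Int × Int) (k t : Int)
    (hk : k ≠ r.1) : lastCnt (s ++ [r]) k t = lastCnt s k t := by
  unfold lastCnt
  rw [List.reverse_append]
  simp only [List.reverse_cons, List.reverse_nil, List.nil_append, List.cons_append,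
    List.find?]
  rw [show ((r.1 == k) : Bool) = false from beq_eq_false_iff_ne.mpr (fun h => hk h.symm),
    Bool.false_and]

theorem lastCnt_append_self (s : List (Int × Int × Int)) (r : Int × Int × Int) (t : Int) :
    lastCnt (s ++ [r]) r.1 t = if r.2.1 == t then r.2.2 else lastCnt s r.1 t := by
  unfold lastCnt
  rw [List.reverse_append]
  simp only [List.reverse_cons, List.reverse_nil, List.nil_append, List.cons_append,
    List.find?]
  by_cases ht : (r.2.1 == t) = true <;> simp [ht]

theorem lastCnt_not_mem (s : List (Int × Int × Int)) (k t : Int) (h : k ∉ keysOf s) :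
    lastCnt s k t = 0 := by
  unfold lastCnt
  rw [List.find?_eq_none.mpr]
  intro r hr
  have hrk : r.1 ∈ keysOf s := List.mem_map_of_mem (List.mem_reverse.mp hr)
  have : ¬ (r.1 == k) = true := fun he => h ((by simpa using he : r.1 = k) ▸ hrk)
  simp [this]

theorem mem_canonK (s : List (Int × Int × Int)) (k : Int) :
    k ∈ canonK s ↔ k ∈ keysOf s := by
  unfold canonK
  rw [PySem.List.mem_sorted, PySem.Set.mem_ofList]

-- a strictly increasing list containing m, all of whose elements are ≤ m, ends in m
theorem getLast?_of_max (ks : List Int) (m : Int) (hpw : ks.Pairwise (· < ·))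
    (hm : m ∈ ks) (hle : ∀ k ∈ ks, k ≤ m) : ks.getLast? = some m := by
  induction ks with
  | nil => cases hm
  | cons a ks ih =>
      cases ks with
      | nil =>
          simp only [List.mem_singleton] at hm
          simp [hm]
      | cons b ks' =>
          have hpw' : (b :: ks').Pairwise (· < ·) := (List.pairwise_cons.mp hpw).2
          have halt : ∀ z ∈ b :: ks', a < z := (List.pairwise_cons.mp hpw).1
          have hm' : m ∈ b :: ks' := by
            rcases List.mem_cons.mp hm with h | h
            · exfalso
              have h1 := hle b (by simp)
              have h2 := halt b (by simp)
              omega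
            · exact h
          rw [List.getLast?_cons_cons]
          exact ih hpw' hm' (fun k hk => hle k (List.mem_cons_of_mem a hk))

theorem canonK_append_mem (s : List (Int × Int × Int)) (r : Int × Int × Int)
    (h : r.1 ∈ keysOf s) : canonK (s ++ [r]) = canonK s := by
  unfold canonK
  refine PySem.List.sorted_eq_sorted_of_perm _ _ _ (fun a b hab => hab) ?_
  rw [List.perm_ext_iff_of_nodup (PySem.Set.nodup_ofList _) (PySem.Set.nodup_ofList _)]
  intro a
  rw [PySem.Set.mem_ofList, PySem.Set.mem_ofList]
  unfold keysOf at h ⊢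
  simp only [List.map_append, List.mem_append, List.map_cons, List.map_nil,
    List.mem_singleton]
  constructor
  · rintro (ha | ha)
    · exact ha
    · exact ha ▸ h
  · exact fun ha => Or.inl ha

theorem canonK_append_not_mem (s : List (Int × Int × Int)) (r : Int × Int × Int)
    (hnm : r.1 ∉ keysOf s) (hle : ∀ y ∈ s, y.1 ≤ r.1) :
    canonK (s ++ [r]) = canonK s ++ [r.1] := by
  have hlt : ∀ k ∈ canonK s, k < r.1 := by
    intro k hk
    have hk' : k ∈ keysOf s := (mem_canonK s k).mp hk
    rcases List.mem_map.mp hk' with ⟨y, hy, hyk⟩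
    have h1 := hle y hy
    have hne : k ≠ r.1 := fun he => hnm (he ▸ hk')
    omega
  unfold canonK
  apply PySem.List.sorted_eq_of_perm_of_pairwise_lt
  · rw [List.perm_ext_iff_of_nodup _ (PySem.Set.nodup_ofList _)]
    · intro a
      rw [PySem.Set.mem_ofList]
      unfold keysOf
      simp only [List.map_append, List.mem_append, List.map_cons, List.map_nil,
        List.mem_singleton]
      constructor
      · rintro (ha | ha)
        · exact Or.inl ((mem_canonK s a).mp ha)
        · exact Or.inr ha
      · rintro (ha | ha)
        · exact Or.inl ((mem_canonK s a).mpr ha)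
        · exact Or.inr ha
    · rw [List.nodup_append]
      refine ⟨(PySem.List.sorted_ofList_pairwise_lt _).nodup, List.nodup_singleton _, ?_⟩
      intro a ha b hb
      rw [List.mem_singleton] at hb
      subst hb
      exact ne_of_lt (hlt a ha)
  · rw [List.pairwise_append]
    exact ⟨PySem.List.sorted_ofList_pairwise_lt _, List.pairwise_singleton _ _,
      fun a ha b hb => (List.mem_singleton.mp hb) ▸ hlt a ha⟩

-- the two shapes of one grouping step, by whether the last group's key matches
theorem groupStep_last_eq (groups : List (Int × List Int)) (r : Int × Int × Int)
    (p : Int × List Int) (h : groups.getLast? = some p) (hpr : p.1 = r.1) :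
    groupStep groups r = assignLast r.2.1 r.2.2 groups := by
  unfold groupStep
  rw [h]
  simp [hpr]

theorem groupStep_last_ne (groups : List (Int × List Int)) (r : Int × Int × Int)
    (h : ∀ p : Int × List Int, groups.getLast? = some p → p.1 ≠ r.1) :
    groupStep groups r = assignLast r.2.1 r.2.2 (groups ++ [(r.1, [0, 0])]) := by
  unfold groupStep
  cases hgl : groups.getLast? with
  | none => rfl
  | some p => simp [h p hgl]

-- main grouping lemma: over a list whose keys are nondecreasing and whose types are 0/1,
-- Source B's grouping fold produces the canonical form
theorem group_sorted (s : List (Int × Int × Int))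
    (hpw : s.Pairwise (fun a b => a.1 ≤ b.1))
    (hv : ∀ r ∈ s, r.2.1 = 0 ∨ r.2.1 = 1) :
    s.foldl groupStep [] = canonC s := by
  induction s using List.reverseRecOn with
  | nil => rfl
  | append_singleton s r ih =>
      have hpw' : s.Pairwise (fun a b => a.1 ≤ b.1) := (List.pairwise_append.mp hpw).1
      have hle : ∀ y ∈ s, y.1 ≤ r.1 := by
        intro y hy
        exact (List.pairwise_append.mp hpw).2.2 y hy r (by simp)
      have hv' : ∀ x ∈ s, x.2.1 = 0 ∨ x.2.1 = 1 :=
        fun x hx => hv x (List.mem_append_left _ hx)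
      have hvr : r.2.1 = 0 ∨ r.2.1 = 1 := hv r (List.mem_append_right _ (by simp))
      rw [List.foldl_append, List.foldl_cons, List.foldl_nil, ih hpw' hv']
      have hFne : ∀ k, k ≠ r.1 →
          ((k, [lastCnt (s ++ [r]) k 0, lastCnt (s ++ [r]) k 1]) : Int × List Int)
            = (k, [lastCnt s k 0, lastCnt s k 1]) := by
        intro k hk
        rw [lastCnt_append_ne s r k 0 hk, lastCnt_append_ne s r k 1 hk]
      by_cases hmem : r.1 ∈ keysOf s
      · -- r.1 already has a group: no append, assign into the last group
        have hklast : (canonK s).getLast? = some r.1 := by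
          apply getLast?_of_max _ _ (PySem.List.sorted_ofList_pairwise_lt _)
          · exact (mem_canonK s r.1).mpr hmem
          · intro k hk
            rcases List.mem_map.mp ((mem_canonK s k).mp hk) with ⟨y, hy, hyk⟩
            exact hyk ▸ hle y hy
        have hne : canonK s ≠ [] := fun h => by simp [h] at hklast
        have hdec : canonK s = (canonK s).dropLast ++ [r.1] := by
          conv_lhs => rw [← List.dropLast_append_getLast hne]
          congr 1
          have := List.getLast?_eq_getLast (l := canonK s) hne
          rw [this] at hklast
          simpa using hklast
        have hlast : (canonC s).getLast?
            = some ((r.1, [lastCnt s r.1 0, lastCnt s r.1 1]) : Int × List Int) := by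
          unfold canonC
          rw [List.getLast?_map, hklast]
          rfl
        have hdlt : ∀ k ∈ (canonK s).dropLast, k < r.1 := by
          intro k hk
          have hpwK : ((canonK s).dropLast ++ [r.1]).Pairwise (· < ·) := by
            rw [← hdec]; exact PySem.List.sorted_ofList_pairwise_lt _
          exact (List.pairwise_append.mp hpwK).2.2 k hk r.1 (by simp)
        rw [groupStep_last_eq _ r _ hlast rfl]
        unfold canonC
        rw [canonK_append_mem s r hmem]
        conv_lhs => rw [hdec]
        conv_rhs => rw [hdec]
        rw [List.map_append, List.map_append, List.map_singleton, List.map_singleton,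
          assignLast_append_single]
        congr 1
        · exact (List.map_congr_left (fun k hk => (hFne k (by
            have := hdlt k hk; omega)))).symm
        · rcases hvr with h0 | h1
          · rw [lastCnt_append_self s r 0, lastCnt_append_self s r 1]
            simp [h0]
          · rw [lastCnt_append_self s r 0, lastCnt_append_self s r 1]
            simp [h1, List.set]
      · -- new key, strictly greater than every existing one: append a fresh group
        have hlastne : ∀ p : Int × List Int, (canonC s).getLast? = some p → p.1 ≠ r.1 := by
          intro p hgl
          have hp' : p.1 ∈ keysOf s := by
            have hpm : p ∈ canonC s := List.mem_of_getLast? hgl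
            unfold canonC at hpm
            rcases List.mem_map.mp hpm with ⟨k, hk, hkp⟩
            rw [← hkp]
            exact (mem_canonK s k).mp hk
          exact fun he => hmem (he ▸ hp')
        rw [groupStep_last_ne _ r hlastne, assignLast_append_single]
        unfold canonC
        rw [canonK_append_not_mem s r hmem hle, List.map_append, List.map_singleton]
        congr 1
        · exact (List.map_congr_left (fun k hk => (hFne k (by
            intro he
            exact hmem (he ▸ (mem_canonK s k).mp hk))))).symm
        · rw [lastCnt_append_self s r 0, lastCnt_append_self s r 1,
            lastCnt_not_mem s r.1 0 hmem, lastCnt_not_mem s r.1 1 hmem]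
          rcases hvr with h0 | h1
          · simp [h0]
          · simp [h1, List.set]

-- ===== VERDICT (by name: the statement is the Claim_ definition above) =====
theorem build_spec : Claim_equal_build := by
  intro l _ hpre
  unfold Spec_build
  rw [build_eq_canon]
  unfold build_alt
  rw [group_sorted _ (PySem.List.sorted_pairwise l _)
    (fun r hr => hpre r ((PySem.List.mem_sorted _ _ _ _).mp hr))]
  unfold canonC
  rw [canonK_sorted]
  exact (List.map_congr_left (fun k _ => by rw [lastCnt_sorted, lastCnt_sorted])).symm
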